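-- pv_equiv track=rewrite | github.com/MSatheem/FreeCodeCamp | DailyCodeChallenge/October 2025/Oct31/Oct31.py | spookify
-- ===== SOURCE A (Python) =====
-- def spookify(boo):
--     #replacing _ and - with  ~
--     replaced_text = boo.replace("_", "~").replace("-","~")
--     #variable to store spookified test
--     spookified = ""
--     count = 0;
--     for i in replaced_text:
--         if i != '~':
--             count += 1
--             if count%2 != 0:
--                 #capitalize characters in even postion
--                 i = i.upper()
--             else :
--                 #small charactes in odd positoin
--                 i = i.lower();
--         spookified = spookified + i
--     return spookified
-- ===== SOURCE B (Python) =====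
-- def spookify(boo):
--     # Extract-then-reassemble: pre-case the non-'~' characters by parity, then merge back.
--     replaced = boo.replace("_", "~").replace("-", "~")
--     cased = [c.upper() if j % 2 == 0 else c.lower()
--              for j, c in enumerate(ch for ch in replaced if ch != '~')]
--     it = iter(cased)
--     return ''.join('~' if ch == '~' else next(it) for ch in replaced)
-- ===== Notes on version B (the rewrite author's own statement) =====
-- stated objective: alternative
-- what changed: Replaces A's single stateful loop carrying a running count with an extract-then-reassemble decomposition: one pass pre-cases the non-separator characters by their parity index, a second pass merges them back around the separators.
import Mathlib
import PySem

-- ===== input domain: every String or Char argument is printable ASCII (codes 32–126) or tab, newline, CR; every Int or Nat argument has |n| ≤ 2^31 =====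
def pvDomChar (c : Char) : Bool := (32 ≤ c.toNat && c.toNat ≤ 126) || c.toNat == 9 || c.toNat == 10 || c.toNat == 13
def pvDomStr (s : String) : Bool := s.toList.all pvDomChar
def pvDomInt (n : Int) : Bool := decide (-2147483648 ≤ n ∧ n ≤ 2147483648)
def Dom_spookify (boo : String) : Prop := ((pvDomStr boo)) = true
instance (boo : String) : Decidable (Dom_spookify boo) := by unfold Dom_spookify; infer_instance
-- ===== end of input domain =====

-- B alternates case by a precomputed parity index instead of A's running count; return values proved equal.
-- ===== PORT A =====
def spookifyStep (st : List Char × Int) (i : Char) : List Char × Int :=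
  if i ≠ '~' then
    let count := st.2 + 1
    let i' := if PySem.Int.mod count 2 ≠ 0 then PySem.Chars.upperChar i else PySem.Chars.lowerChar i
    (st.1 ++ [i'], count)
  else
    (st.1 ++ [i], st.2)

def spookify (boo : String) : String :=
  let replaced := PySem.Str.replace (PySem.Str.replace boo "_" "~") "-" "~"
  String.mk (replaced.toList.foldl spookifyStep ([], 0)).1

-- ===== PORT B =====
def spookifyCase (p : Int × Char) : Char :=
  if PySem.Int.mod p.1 2 = 0 then PySem.Chars.upperChar p.2 else PySem.Chars.lowerChar p.2

-- second pass: emit '~' unchanged, otherwise consume the next pre-cased character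
def spookifyReassemble : List Char → List Char → List Char
  | [], _ => []
  | c :: rest, cased =>
    if c = '~' then '~' :: spookifyReassemble rest cased
    else
      match cased with
      | [] => spookifyReassemble rest []
      | d :: ds => d :: spookifyReassemble rest ds

def spookify_alt (boo : String) : String :=
  let replaced := (PySem.Str.replace (PySem.Str.replace boo "_" "~") "-" "~").toList
  let cased := (PySem.List.enumerate (replaced.filter (· ≠ '~')) 0).map spookifyCase
  String.mk (spookifyReassemble replaced cased)

-- ===== PRECONDITION & SPEC =====
def Spec_spookify (boo : String) (out : String) : Prop := out = spookify_alt boo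
instance (boo : String) (out : String) : Decidable (Spec_spookify boo out) := by unfold Spec_spookify; infer_instance

-- ===== CLAIM (what is proved, stated in full; the proofs are below) =====
def Claim_equal_spookify : Prop := ∀ (boo : String), Dom_spookify boo → Spec_spookify boo (spookify boo)

-- ===== LEMMAS AND PROOFS =====
lemma spookify_parity (n : Int) : (PySem.Int.mod (n + 1) 2 ≠ 0) ↔ PySem.Int.mod n 2 = 0 := by
  rw [PySem.Int.mod_eq_emod_of_pos (show (0:Int) < 2 by omega),
    PySem.Int.mod_eq_emod_of_pos (show (0:Int) < 2 by omega)]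
  omega

lemma spookify_loop (l : List Char) (acc : List Char) (n : Int) :
    (l.foldl spookifyStep (acc, n)).1 =
      acc ++ spookifyReassemble l ((PySem.List.enumerate (l.filter (· ≠ '~')) n).map spookifyCase) := by
  induction l generalizing acc n with
  | nil => simp [spookifyReassemble]
  | cons c rest ih =>
    by_cases hc : c = '~'
    · subst hc
      rw [List.foldl_cons, show spookifyStep (acc, n) '~' = (acc ++ ['~'], n) by
        simp [spookifyStep], ih]
      simp [spookifyReassemble]
    · rw [List.foldl_cons, show spookifyStep (acc, n) c =
          (acc ++ [if PySem.Int.mod (n + 1) 2 ≠ 0 then PySem.Chars.upperChar c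
            else PySem.Chars.lowerChar c], n + 1) by simp [spookifyStep, hc], ih,
        show (c :: rest).filter (· ≠ '~') = c :: rest.filter (· ≠ '~') by simp [hc],
        PySem.List.enumerate_cons, List.map_cons]
      simp only [spookifyReassemble, if_neg hc, List.append_assoc, List.singleton_append]
      congr 2
      simp only [spookifyCase]
      by_cases h : PySem.Int.mod (n + 1) 2 ≠ 0
      · rw [if_pos h, if_pos ((spookify_parity n).mp h)]
      · rw [if_neg h, if_neg (fun h0 => h ((spookify_parity n).mpr h0))]

-- ===== VERDICT (by name: the statement is the Claim_ definition above) =====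
theorem spookify_spec : Claim_equal_spookify := by
  intro boo _
  unfold Spec_spookify spookify spookify_alt
  simp only []
  rw [spookify_loop, List.nil_append]
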